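-- pv_equiv track=rewrite | github.com/alexandraby/PI | PI - Ailson 05-12-23/PI - Ailson_alt/minha_app/app.py | agrupar_publicacoes_por_categoria
-- ===== SOURCE A (Python) =====
-- def agrupar_publicacoes_por_categoria(publicacoes):
--     categorias_publicacoes = {}
--     for publicacao in publicacoes:
--         categoria = publicacao["categoria"]
--         if categoria not in categorias_publicacoes:
--             categorias_publicacoes[categoria] = []
--         categorias_publicacoes[categoria].append(publicacao)
--     return categorias_publicacoes
-- ===== SOURCE B (Python) =====
-- def agrupar_publicacoes_por_categoria(publicacoes):
--     categorias = list(dict.fromkeys(p["categoria"] for p in publicacoes))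
--     return {c: [p for p in publicacoes if p["categoria"] == c] for c in categorias}
-- ===== Notes on version B (the rewrite author's own statement) =====
-- stated objective: alternative
-- what changed: Replaces the single hash-grouping pass with a two-phase decomposition: first an ordered-unique list of categories (dict.fromkeys), then a dict comprehension filtering the publications once per category.
import Mathlib
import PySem

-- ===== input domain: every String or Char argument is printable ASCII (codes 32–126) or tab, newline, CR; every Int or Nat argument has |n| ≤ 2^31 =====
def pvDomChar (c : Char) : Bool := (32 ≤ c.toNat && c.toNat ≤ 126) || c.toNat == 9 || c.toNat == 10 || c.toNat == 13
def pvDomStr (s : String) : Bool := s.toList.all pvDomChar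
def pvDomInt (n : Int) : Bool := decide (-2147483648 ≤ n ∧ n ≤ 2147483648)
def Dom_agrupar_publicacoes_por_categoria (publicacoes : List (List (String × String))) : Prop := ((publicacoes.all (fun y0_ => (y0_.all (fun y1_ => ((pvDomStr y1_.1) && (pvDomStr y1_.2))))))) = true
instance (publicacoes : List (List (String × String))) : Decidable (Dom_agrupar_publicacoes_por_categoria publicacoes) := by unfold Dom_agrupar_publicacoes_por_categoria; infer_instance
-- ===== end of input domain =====

-- B builds the same grouping by a two-phase decomposition (ordered-unique category list, then one filter pass per category) instead of A's single hash-grouping pass; objective: alternative (same result, not faster).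

-- shared helper: publicacao["categoria"] (first match in the dict; "" only outside Pre_, where Python raises KeyError)
def pvCat (p : List (String × String)) : String :=
  ((PySem.Dict.mk p).get? "categoria").getD ""

-- ===== PORT A =====
def agrupar_publicacoes_por_categoria (publicacoes : List (List (String × String))) : List (String × List (List (String × String))) :=
  (publicacoes.foldl
    (fun d publicacao =>
      let categoria := pvCat publicacao
      let d := if d.contains categoria then d else d.insert categoria ([] : List (List (String × String)))
      d.modify categoria [] (· ++ [publicacao]))
    PySem.Dict.empty).items

-- ===== PORT B =====
def agrupar_publicacoes_por_categoria_alt (publicacoes : List (List (String × String))) : List (String × List (List (String × String))) :=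
  (PySem.List.dedup (publicacoes.map pvCat)).map
    (fun c => (c, publicacoes.filter (fun p => pvCat p == c)))

-- ===== PRECONDITION & SPEC =====
-- Pre_ excludes exactly the inputs containing a publication without a "categoria" key, on which A (and B) raise KeyError.
def Pre_agrupar_publicacoes_por_categoria (publicacoes : List (List (String × String))) : Prop :=
  ∀ p ∈ publicacoes, (PySem.Dict.mk p).contains "categoria" = true
instance (publicacoes : List (List (String × String))) : Decidable (Pre_agrupar_publicacoes_por_categoria publicacoes) := by unfold Pre_agrupar_publicacoes_por_categoria; infer_instance
def pvWitness_agrupar_publicacoes_por_categoria : (List (List (String × String))) := [[("categoria", "a"), ("titulo", "t")]]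

def Spec_agrupar_publicacoes_por_categoria (publicacoes : List (List (String × String))) (out : List (String × List (List (String × String)))) : Prop := out = agrupar_publicacoes_por_categoria_alt publicacoes
instance (publicacoes : List (List (String × String))) (out : List (String × List (List (String × String)))) : Decidable (Spec_agrupar_publicacoes_por_categoria publicacoes out) := by unfold Spec_agrupar_publicacoes_por_categoria; infer_instance

-- ===== CLAIM (what is proved, stated in full; the proofs are below) =====
def Claim_equal_agrupar_publicacoes_por_categoria : Prop := ∀ (publicacoes : List (List (String × String))), Dom_agrupar_publicacoes_por_categoria publicacoes → Pre_agrupar_publicacoes_por_categoria publicacoes → Spec_agrupar_publicacoes_por_categoria publicacoes (agrupar_publicacoes_por_categoria publicacoes)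

-- ===== LEMMAS AND PROOFS =====

-- A's guarded insert-then-append step equals a plain modify-append step.
theorem pv_step_eq_modify (d : PySem.Dict String (List (List (String × String)))) (c : String) (p : List (String × String)) :
    (if d.contains c then d else d.insert c ([] : List (List (String × String)))).modify c [] (· ++ [p])
      = d.modify c [] (· ++ [p]) := by
  by_cases h : d.contains c = true
  · simp [h]
  · rw [if_neg h]
    replace h : d.contains c = false := by simpa using h
    have h' : (d.items.any fun q => q.1 == c) = false := by simpa [PySem.Dict.contains] using h
    have hall := List.any_eq_false.mp h'
    have hm : ∀ (V : List (List (String × String))), List.map (fun q => if q.1 = c then (c, V) else q) d.items = d.items := by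
      intro V
      rw [List.map_congr_left (g := id), List.map_id]
      intro a ha
      simp [show ¬ a.1 = c from by simpa using hall a ha]
    have hfind : d.items.find? (fun q => q.1 == c) = none := by
      rw [List.find?_eq_none]
      intro a ha
      simpa using hall a ha
    simp [PySem.Dict.modify, PySem.Dict.insert, PySem.Dict.contains, PySem.Dict.getD, PySem.Dict.get?, h', hm, hfind]

-- A's whole loop therefore equals the plain modify-append grouping loop.
theorem pv_foldl_eq (publicacoes : List (List (String × String))) :
    publicacoes.foldl
      (fun d publicacao =>
        let categoria := pvCat publicacao
        let d := if d.contains categoria then d else d.insert categoria ([] : List (List (String × String)))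
        d.modify categoria [] (· ++ [publicacao]))
      PySem.Dict.empty
    = publicacoes.foldl (fun d p => d.modify (pvCat p) [] (· ++ [p])) PySem.Dict.empty := by
  have hfun : (fun (d : PySem.Dict String (List (List (String × String)))) publicacao =>
      let categoria := pvCat publicacao
      let d := if d.contains categoria then d else d.insert categoria ([] : List (List (String × String)))
      d.modify categoria [] (· ++ [publicacao]))
      = fun d p => d.modify (pvCat p) [] (· ++ [p]) := by
    funext d p
    exact pv_step_eq_modify d (pvCat p) p
  rw [hfun]

-- The modify-append grouping loop's items are exactly B's dedup-then-filter table.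
theorem pv_items_eq (pubs : List (List (String × String))) :
    (pubs.foldl (fun d p => d.modify (pvCat p) [] (· ++ [p])) PySem.Dict.empty).items
    = (PySem.List.dedup (pubs.map pvCat)).map (fun c => (c, pubs.filter (fun p => pvCat p == c))) := by
  set F := fun (d : PySem.Dict String (List (List (String × String)))) p => d.modify (pvCat p) [] (· ++ [p]) with hF
  have hnd : (pubs.foldl F PySem.Dict.empty).keys.Nodup :=
    PySem.Dict.nodup_keys_foldl_modify_key pubs pvCat [] (fun d p => (· ++ [p])) PySem.Dict.empty (by simp)
  have hkeys : (pubs.foldl F PySem.Dict.empty).keys = PySem.List.dedup (pubs.map pvCat) := by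
    rw [hF, PySem.Dict.keys_foldl_modify_key]
    simp [PySem.Set.update, PySem.Set.ofList, PySem.Dict.keys_empty, PySem.List.dedup_eq_ofList]
  have hgetD : ∀ c, (pubs.foldl F PySem.Dict.empty).getD c [] = pubs.filter (fun p => pvCat p == c) := by
    intro c
    have hmap : pubs.foldl F PySem.Dict.empty
        = (pubs.map (fun p => (pvCat p, p))).foldl (fun d q => d.modify q.1 [] (· ++ [q.2])) PySem.Dict.empty := by
      rw [List.foldl_map]
    rw [hmap, PySem.Dict.getD_foldl_modify_append]
    simp [PySem.Dict.getD_empty, List.filter_map, Function.comp_def, List.map_map]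
  rw [PySem.Dict.items_eq_map_keys _ hnd ([] : List (List (String × String))), hkeys]
  exact List.map_congr_left (fun c _ => by rw [hgetD c])

-- ===== VERDICT (by name: the statement is the Claim_ definition above) =====
theorem agrupar_publicacoes_por_categoria_spec : Claim_equal_agrupar_publicacoes_por_categoria := by
  intro pubs _ _
  unfold Spec_agrupar_publicacoes_por_categoria
  unfold agrupar_publicacoes_por_categoria agrupar_publicacoes_por_categoria_alt
  rw [pv_foldl_eq, pv_items_eq]
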